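-- pv_equiv track=rewrite | github.com/rmnanney/PAWS360 | scripts/jira/reorder_jira_workitems.py | determine_logical_order
-- ===== SOURCE A (Python) =====
-- from typing import List, Dict, Any
--
-- def determine_logical_order(work_items: List[Dict[str, Any]]) -> List[Dict[str, Any]]:
--     """Determine logical order based on operational dependencies"""
--
--     # Define dependency mapping based on task content
--     dependency_rules = {
--         # Foundation tasks (must come first)
--         "database": ["Database Schema Implementation", "Seed Data Population"],
--         "infrastructure": ["Database Schema Implementation", "Seed Data Population"],
--
--         # Authentication (depends on basic infrastructure)
--         "auth": ["Authentication Framework Setup"],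
--         "security": ["Authentication Framework Setup"],
--
--         # UI/Dashboard (depends on auth and data)
--         "frontend": ["AdminLTE Dashboard Integration"],
--         "dashboard": ["AdminLTE Dashboard Integration"],
--         "ui": ["AdminLTE Dashboard Integration"],
--
--         # Integration (depends on core systems)
--         "integration": ["PeopleSoft Integration"],
--         "peoplesoft": ["PeopleSoft Integration"],
--
--         # Testing (depends on implementation)
--         "testing": ["Comprehensive Testing", "Performance Validation"],
--         "qa": ["Comprehensive Testing", "Performance Validation"],
--         "performance": ["Performance Validation"],
--
--         # Operations (can come later)
--         "monitoring": ["Monitoring & Alerting Setup"],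
--         "logging": ["Monitoring & Alerting Setup"],
--         "documentation": ["Documentation Updates"],
--         "devops": ["CI/CD Pipeline Configuration"],
--         "ci-cd": ["CI/CD Pipeline Configuration"]
--     }
--
--     ordered_items = []
--     processed_items = set()
--
--     # Phase 1: Foundation (Database & Infrastructure)
--     for item in work_items:
--         summary = item.get('summary', '').lower()
--         if any(keyword in summary for keyword in dependency_rules['database'] + dependency_rules['infrastructure']):
--             if item['key'] not in processed_items:
--                 ordered_items.append(item)
--                 processed_items.add(item['key'])
--
--     # Phase 2: Security & Authentication
--     for item in work_items:
--         summary = item.get('summary', '').lower()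
--         if any(keyword in summary for keyword in dependency_rules['auth'] + dependency_rules['security']):
--             if item['key'] not in processed_items:
--                 ordered_items.append(item)
--                 processed_items.add(item['key'])
--
--     # Phase 3: User Interface & Frontend
--     for item in work_items:
--         summary = item.get('summary', '').lower()
--         if any(keyword in summary for keyword in dependency_rules['frontend'] + dependency_rules['dashboard'] + dependency_rules['ui']):
--             if item['key'] not in processed_items:
--                 ordered_items.append(item)
--                 processed_items.add(item['key'])
--
--     # Phase 4: System Integration
--     for item in work_items:
--         summary = item.get('summary', '').lower()
--         if any(keyword in summary for keyword in dependency_rules['integration'] + dependency_rules['peoplesoft']):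
--             if item['key'] not in processed_items:
--                 ordered_items.append(item)
--                 processed_items.add(item['key'])
--
--     # Phase 5: Testing & Validation
--     for item in work_items:
--         summary = item.get('summary', '').lower()
--         if any(keyword in summary for keyword in dependency_rules['testing'] + dependency_rules['qa'] + dependency_rules['performance']):
--             if item['key'] not in processed_items:
--                 ordered_items.append(item)
--                 processed_items.add(item['key'])
--
--     # Phase 6: Operations & Maintenance
--     for item in work_items:
--         summary = item.get('summary', '').lower()
--         if any(keyword in summary for keyword in dependency_rules['monitoring'] + dependency_rules['logging'] + dependency_rules['documentation'] + dependency_rules['devops'] + dependency_rules['ci-cd']):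
--             if item['key'] not in processed_items:
--                 ordered_items.append(item)
--                 processed_items.add(item['key'])
--
--     # Add any remaining items that weren't categorized
--     for item in work_items:
--         if item['key'] not in processed_items:
--             ordered_items.append(item)
--             processed_items.add(item['key'])
--
--     return ordered_items
-- ===== SOURCE B (Python) =====
-- def determine_logical_order(work_items):
--     # Every phase keyword in A contains an uppercase letter but is searched inside a
--     # lowercased summary, so no phase test ever fires; the whole function reduces to a
--     # single stable dedup-by-key pass.
--     ordered_items = []
--     seen = set()
--     for item in work_items:
--         key = item['key']
--         if key not in seen:
--             seen.add(key)
--             ordered_items.append(item)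
--     return ordered_items
-- ===== Notes on version B (the rewrite author's own statement) =====
-- stated objective: simpler
-- what changed: Every keyword A tests contains uppercase letters yet is searched inside a lowercased summary, so none of the six phase passes can ever select an item; B drops them and returns the single remaining pass, a one-loop stable dedup by key.
import Mathlib
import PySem

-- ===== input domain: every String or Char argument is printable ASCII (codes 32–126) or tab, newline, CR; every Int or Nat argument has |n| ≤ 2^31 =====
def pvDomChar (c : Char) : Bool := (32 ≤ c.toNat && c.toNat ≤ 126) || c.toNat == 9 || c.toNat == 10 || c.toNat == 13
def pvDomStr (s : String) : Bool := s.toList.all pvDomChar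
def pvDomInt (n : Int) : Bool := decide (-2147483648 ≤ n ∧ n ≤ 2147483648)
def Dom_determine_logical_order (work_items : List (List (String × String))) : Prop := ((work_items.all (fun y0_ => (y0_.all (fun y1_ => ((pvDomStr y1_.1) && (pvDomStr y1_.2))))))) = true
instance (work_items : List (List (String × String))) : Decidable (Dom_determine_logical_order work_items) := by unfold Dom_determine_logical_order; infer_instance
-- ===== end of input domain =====

-- B: all of A's phase keywords contain uppercase letters but are searched inside a lowercased
-- summary, so no phase pass ever selects an item; B is the one remaining pass, a stable dedup by key.


-- ===== PORT A =====
-- dependency_rules literal dict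
def pvDependencyRules : PySem.Dict String (List String) := PySem.Dict.ofList
  [("database", ["Database Schema Implementation", "Seed Data Population"]),
   ("infrastructure", ["Database Schema Implementation", "Seed Data Population"]),
   ("auth", ["Authentication Framework Setup"]),
   ("security", ["Authentication Framework Setup"]),
   ("frontend", ["AdminLTE Dashboard Integration"]),
   ("dashboard", ["AdminLTE Dashboard Integration"]),
   ("ui", ["AdminLTE Dashboard Integration"]),
   ("integration", ["PeopleSoft Integration"]),
   ("peoplesoft", ["PeopleSoft Integration"]),
   ("testing", ["Comprehensive Testing", "Performance Validation"]),
   ("qa", ["Comprehensive Testing", "Performance Validation"]),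
   ("performance", ["Performance Validation"]),
   ("monitoring", ["Monitoring & Alerting Setup"]),
   ("logging", ["Monitoring & Alerting Setup"]),
   ("documentation", ["Documentation Updates"]),
   ("devops", ["CI/CD Pipeline Configuration"]),
   ("ci-cd", ["CI/CD Pipeline Configuration"])]

-- dependency_rules['k'] (the key is always present in the literal dict, so getD [] is exact)
def pvDepGet (k : String) : List String := PySem.Dict.getD pvDependencyRules k []

-- item['key'] — KeyError when absent; Pre_ excludes that, so .getD "" is never reached there
def pvItemKey (item : List (String × String)) : String :=
  (PySem.Dict.get? (PySem.Dict.mk item) "key").getD ""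

-- body of each of A's six phase loops (they are textually identical up to the keyword list)
def pvPhaseStep (kws : List String)
    (st : List (List (String × String)) × PySem.Set String)
    (item : List (String × String)) : List (List (String × String)) × PySem.Set String :=
  let summary := PySem.Str.lower (PySem.Dict.getD (PySem.Dict.mk item) "summary" "")
  if kws.any (fun kw => PySem.Str.isIn kw summary) then
    if PySem.Set.contains st.2 (pvItemKey item) then st
    else (st.1 ++ [item], PySem.Set.add st.2 (pvItemKey item))
  else st

def determine_logical_order (work_items : List (List (String × String))) : List (List (String × String)) :=
  let st0 : List (List (String × String)) × PySem.Set String := ([], PySem.Set.empty)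
  let st1 := work_items.foldl (pvPhaseStep (pvDepGet "database" ++ pvDepGet "infrastructure")) st0
  let st2 := work_items.foldl (pvPhaseStep (pvDepGet "auth" ++ pvDepGet "security")) st1
  let st3 := work_items.foldl (pvPhaseStep (pvDepGet "frontend" ++ pvDepGet "dashboard" ++ pvDepGet "ui")) st2
  let st4 := work_items.foldl (pvPhaseStep (pvDepGet "integration" ++ pvDepGet "peoplesoft")) st3
  let st5 := work_items.foldl (pvPhaseStep (pvDepGet "testing" ++ pvDepGet "qa" ++ pvDepGet "performance")) st4
  let st6 := work_items.foldl (pvPhaseStep (pvDepGet "monitoring" ++ pvDepGet "logging" ++ pvDepGet "documentation" ++ pvDepGet "devops" ++ pvDepGet "ci-cd")) st5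
  let fin := work_items.foldl (fun st item =>
      if PySem.Set.contains st.2 (pvItemKey item) then st
      else (st.1 ++ [item], PySem.Set.add st.2 (pvItemKey item))) st6
  fin.1

-- ===== PORT B =====
def determine_logical_order_alt (work_items : List (List (String × String))) : List (List (String × String)) :=
  (work_items.foldl (fun (st : List (List (String × String)) × PySem.Set String) item =>
      let key := (PySem.Dict.get? (PySem.Dict.mk item) "key").getD ""
      if PySem.Set.contains st.2 key then st
      else (st.1 ++ [item], PySem.Set.add st.2 key))
    ([], PySem.Set.empty)).1

-- ===== PRECONDITION & SPEC =====
-- Pre_ excludes exactly the inputs where some item lacks a 'key' entry: there A raises KeyError.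
def Pre_determine_logical_order (work_items : List (List (String × String))) : Prop :=
  (work_items.all (fun item => PySem.Dict.contains (PySem.Dict.mk item) "key")) = true
instance (work_items : List (List (String × String))) : Decidable (Pre_determine_logical_order work_items) := by unfold Pre_determine_logical_order; infer_instance

def pvWitness_determine_logical_order : (List (List (String × String))) :=
  [[("key", "PAWS-1"), ("summary", "Database Schema Implementation")],
   [("key", "PAWS-2"), ("summary", "auth work")],
   [("key", "PAWS-1"), ("summary", "duplicate")]]

def Spec_determine_logical_order (work_items : List (List (String × String))) (out : List (List (String × String))) : Prop := out = determine_logical_order_alt work_items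
instance (work_items : List (List (String × String))) (out : List (List (String × String))) : Decidable (Spec_determine_logical_order work_items out) := by unfold Spec_determine_logical_order; infer_instance

-- ===== CLAIM (what is proved, stated in full; the proofs are below) =====
def Claim_equal_determine_logical_order : Prop := ∀ (work_items : List (List (String × String))), Dom_determine_logical_order work_items → Pre_determine_logical_order work_items → Spec_determine_logical_order work_items (determine_logical_order work_items)

-- ===== LEMMAS AND PROOFS =====

-- lowering a character never yields an uppercase letter
lemma pv_lowerChar_ne_upper (c u : Char) (hu : PySem.Chars.isupper u = true) :
    PySem.Chars.lowerChar c ≠ u := by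
  intro h
  unfold PySem.Chars.lowerChar at h
  split_ifs at h with hc
  · have hc' : 65 ≤ c.toNat ∧ c.toNat ≤ 90 := by
      simp [PySem.Chars.isupper, Char.le_def] at hc
      exact ⟨hc.1, hc.2⟩
    have hv : (Char.ofNat (c.toNat + 32)).toNat = c.toNat + 32 := by
      rw [Char.toNat_ofNat, if_pos]
      exact Or.inl (by omega)
    have hu' : 65 ≤ u.toNat ∧ u.toNat ≤ 90 := by
      simp [PySem.Chars.isupper, Char.le_def] at hu
      exact ⟨hu.1, hu.2⟩
    rw [h] at hv
    omega
  · rw [h] at hc; rw [hu] at hc; simp at hc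

-- a keyword containing an uppercase letter is never a substring of a lowercased string
lemma pv_isIn_lower_false (kw s : String)
    (hkw : kw.toList.any PySem.Chars.isupper = true) :
    PySem.Str.isIn kw (PySem.Str.lower s) = false := by
  rw [PySem.Str.isIn_eq, PySem.Str.toList_lower]
  rw [PySem.Chars.isIn_eq_false_iff]
  intro hinf
  obtain ⟨u, humem, hu⟩ := List.any_eq_true.mp hkw
  have humem' : u ∈ PySem.Chars.lower s.toList := hinf.subset humem
  obtain ⟨d, _, hd⟩ := List.mem_map.mp humem'
  exact pv_lowerChar_ne_upper d u hu hd

-- a phase loop whose keywords all contain an uppercase letter changes nothing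
lemma pv_phase_id (kws : List String)
    (hkws : (kws.all (fun kw => kw.toList.any PySem.Chars.isupper)) = true)
    (work_items : List (List (String × String)))
    (st : List (List (String × String)) × PySem.Set String) :
    work_items.foldl (pvPhaseStep kws) st = st := by
  have hstep : ∀ (acc : List (List (String × String)) × PySem.Set String)
      (item : List (String × String)), pvPhaseStep kws acc item = acc := by
    intro acc item
    unfold pvPhaseStep
    rw [if_neg]
    simp only [Bool.not_eq_true, List.any_eq_false]
    intro kw hkw
    exact pv_isIn_lower_false kw _ (List.all_eq_true.mp hkws kw hkw)
  induction work_items generalizing st with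
  | nil => rfl
  | cons h t ih => rw [List.foldl_cons, hstep st h, ih]

-- ===== VERDICT (by name: the statement is the Claim_ definition above) =====
theorem determine_logical_order_spec : Claim_equal_determine_logical_order := by
  intro work_items _ _
  unfold Spec_determine_logical_order
  simp only [determine_logical_order, determine_logical_order_alt]
  rw [pv_phase_id _ (by decide), pv_phase_id _ (by decide), pv_phase_id _ (by decide),
      pv_phase_id _ (by decide), pv_phase_id _ (by decide), pv_phase_id _ (by decide)]
  rfl
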